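-- pv_equiv track=rewrite | github.com/Suslikbot/suslik_bot | src/bot/handlers/onboarding_callbacks.py | response_to_blocks
-- ===== SOURCE A (Python) =====
-- def response_to_blocks(text: str) -> list[str]:
--     blocks = []
--     current = []
--
--     for line in text.splitlines():
--         line = line.strip()
--         if not line:
--             continue
--
--         # Заголовки этапов
--         if line[0].isdigit() and "." in line[:3]:
--             if current:
--                 blocks.append("<br>".join(current))
--                 current = []
--             current.append(f"<h2>{line}</h2>")
--         else:
--             current.append(line)
--
--     if current:
--         blocks.append("<br>".join(current))
--
--     return blocks
-- ===== SOURCE B (Python) =====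
-- def response_to_blocks(text: str) -> list[str]:
--     # Stage 1: clean the lines (strip, drop empties) as a separate pass.
--     lines = [s for s in (l.strip() for l in text.splitlines()) if s]
--
--     def is_heading(l: str) -> bool:
--         return l[0].isdigit() and "." in l[:3]
--
--     # Stage 2: repeatedly split off one whole block (its first line plus the
--     # run of following non-heading lines), instead of a per-line accumulator.
--     blocks = []
--     ls = lines
--     while ls:
--         head, rest = ls[0], ls[1:]
--         first = f"<h2>{head}</h2>" if is_heading(head) else head
--         i = 0
--         while i < len(rest) and not is_heading(rest[i]):
--             i += 1
--         blocks.append("<br>".join([first] + rest[:i]))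
--         ls = rest[i:]
--     return blocks
-- ===== Notes on version B (the rewrite author's own statement) =====
-- stated objective: alternative
-- what changed: B first cleans the lines in a separate pass, then repeatedly splits off one whole block at a time (the leading line plus the following run of non-heading lines, found by an inner scan), instead of A's per-line accumulator-and-flush state machine.
import Mathlib
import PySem

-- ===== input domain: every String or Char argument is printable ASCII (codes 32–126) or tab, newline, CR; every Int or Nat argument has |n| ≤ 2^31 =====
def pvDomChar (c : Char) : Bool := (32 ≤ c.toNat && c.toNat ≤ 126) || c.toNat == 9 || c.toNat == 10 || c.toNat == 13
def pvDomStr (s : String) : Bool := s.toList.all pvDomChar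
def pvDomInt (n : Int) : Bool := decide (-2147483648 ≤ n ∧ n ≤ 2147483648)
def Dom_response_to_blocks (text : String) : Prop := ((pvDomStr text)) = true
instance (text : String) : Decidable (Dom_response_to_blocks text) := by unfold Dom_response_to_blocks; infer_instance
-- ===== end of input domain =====

-- B replaces A's per-line accumulator-and-flush state machine by two stages: clean the lines
-- first, then repeatedly split off one whole block (heading + following run of non-headings)
-- with an inner scan (objective: alternative decomposition; same O(n) cost).

-- ===== PORT A =====
-- line[0].isdigit() and "." in line[:3]  (shared by both Pythons verbatim)
def pvIsHeading (l : List Char) : Bool :=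
  (match PySem.List.pyGet? l 0 with
   | some c => PySem.Chars.isdigit c
   | none => false)
  && PySem.Chars.isIn ['.'] (PySem.List.slice l none (some 3))

-- loop body of A: state is (blocks, current)
def pvStepA (st : List String × List String) (rawLine : String) : List String × List String :=
  let line := PySem.Str.strip rawLine
  if line = "" then st
  else if pvIsHeading line.toList then
    let blocks := if st.2 ≠ [] then st.1 ++ [PySem.Str.join "<br>" st.2] else st.1
    (blocks, ["<h2>" ++ line ++ "</h2>"])
  else (st.1, st.2 ++ [line])

def response_to_blocks (text : String) : List String :=
  let st := (PySem.Str.splitlines text).foldl pvStepA ([], [])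
  if st.2 ≠ [] then st.1 ++ [PySem.Str.join "<br>" st.2] else st.1

-- ===== PORT B =====
-- the outer while loop of B: split off the first block, recurse on the remainder;
-- the inner index-scan 'while i < len(rest) and not is_heading(rest[i])' with the
-- subsequent rest[:i] / rest[i:] is ported as takeWhile / dropWhile of that predicate
def pvBuild : List String → List String
  | [] => []
  | head :: rest =>
    let first := if pvIsHeading head.toList then "<h2>" ++ head ++ "</h2>" else head
    PySem.Str.join "<br>" (first :: rest.takeWhile (fun x => !pvIsHeading x.toList))
      :: pvBuild (rest.dropWhile (fun x => !pvIsHeading x.toList))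
termination_by ls => ls.length
decreasing_by
  have := List.length_dropWhile_le (p := fun x => !pvIsHeading x.toList) (l := rest)
  simp; omega

def response_to_blocks_alt (text : String) : List String :=
  pvBuild (((PySem.Str.splitlines text).map PySem.Str.strip).filter (fun s => s != ""))

-- ===== PRECONDITION & SPEC =====
def Spec_response_to_blocks (text : String) (out : List String) : Prop := out = response_to_blocks_alt text
instance (text : String) (out : List String) : Decidable (Spec_response_to_blocks text out) := by unfold Spec_response_to_blocks; infer_instance

-- ===== CLAIM (what is proved, stated in full; the proofs are below) =====
def Claim_equal_response_to_blocks : Prop := ∀ (text : String), Dom_response_to_blocks text → Spec_response_to_blocks text (response_to_blocks text)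

-- ===== LEMMAS AND PROOFS =====

-- A's final flush
def pvFlush (st : List String × List String) : List String :=
  if st.2 ≠ [] then st.1 ++ [PySem.Str.join "<br>" st.2] else st.1

-- A's loop body specialised to an already stripped, non-empty line
def pvStepA' (st : List String × List String) (line : String) : List String × List String :=
  if pvIsHeading line.toList then
    ((if st.2 ≠ [] then st.1 ++ [PySem.Str.join "<br>" st.2] else st.1),
     ["<h2>" ++ line ++ "</h2>"])
  else (st.1, st.2 ++ [line])

theorem pvFold_clean (ls : List String) (st : List String × List String) :
    ls.foldl pvStepA st = ((ls.map PySem.Str.strip).filter (fun s => s != "")).foldl pvStepA' st := by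
  induction ls generalizing st with
  | nil => rfl
  | cons l ls ih =>
    by_cases he : PySem.Str.strip l = ""
    · simp [List.foldl, pvStepA, he, ih]
    · simp [List.foldl, pvStepA, pvStepA', he, ih]

theorem pvMain (ls : List String) (blocks cur : List String) (hc : cur ≠ []) :
    pvFlush (ls.foldl pvStepA' (blocks, cur))
      = blocks ++ PySem.Str.join "<br>" (cur ++ ls.takeWhile (fun x => !pvIsHeading x.toList))
          :: pvBuild (ls.dropWhile (fun x => !pvIsHeading x.toList)) := by
  induction ls generalizing blocks cur with
  | nil => simp [pvFlush, pvBuild, hc]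
  | cons l ls ih =>
    by_cases hh : pvIsHeading l.toList = true
    · have h1 : (l :: ls).foldl pvStepA' (blocks, cur)
          = ls.foldl pvStepA' (blocks ++ [PySem.Str.join "<br>" cur], ["<h2>" ++ l ++ "</h2>"]) := by
        simp [List.foldl, pvStepA', hh, hc]
      rw [h1, ih _ _ (by simp)]
      simp [List.takeWhile, List.dropWhile, hh, pvBuild]
    · have h1 : (l :: ls).foldl pvStepA' (blocks, cur)
          = ls.foldl pvStepA' (blocks, cur ++ [l]) := by
        simp [List.foldl, pvStepA', hh]
      rw [h1, ih _ _ (by simp)]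
      simp [List.takeWhile, List.dropWhile, hh]

-- ===== VERDICT (by name: the statement is the Claim_ definition above) =====
theorem response_to_blocks_spec : Claim_equal_response_to_blocks := by
  intro text _
  show response_to_blocks text = response_to_blocks_alt text
  show pvFlush ((PySem.Str.splitlines text).foldl pvStepA ([], [])) = response_to_blocks_alt text
  unfold response_to_blocks_alt
  rw [pvFold_clean]
  cases hls : ((PySem.Str.splitlines text).map PySem.Str.strip).filter (fun s => s != "") with
  | nil => simp [pvFlush, pvBuild]
  | cons l ls =>
    have h1 : (l :: ls).foldl pvStepA' ([], [])
        = ls.foldl pvStepA' ([], [if pvIsHeading l.toList then "<h2>" ++ l ++ "</h2>" else l]) := by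
      by_cases hh : pvIsHeading l.toList = true <;> simp [List.foldl, pvStepA', hh]
    rw [h1, pvMain _ _ _ (by simp)]
    by_cases hh : pvIsHeading l.toList = true <;> simp [pvBuild, hh]
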